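-- pv_equiv track=rewrite | github.com/sueszli/vector-database-benchmark | dataset/python-mutated/ribes_score.py | find_increasing_sequences
-- ===== SOURCE A (Python) =====
-- def find_increasing_sequences(worder):
--     if False:
--         return 10
--     '\n    Given the *worder* list, this function groups monotonic +1 sequences.\n\n        >>> worder = [7, 8, 9, 10, 6, 0, 1, 2, 3, 4, 5]\n        >>> list(find_increasing_sequences(worder))\n        [(7, 8, 9, 10), (0, 1, 2, 3, 4, 5)]\n\n    :param worder: The worder list output from word_rank_alignment\n    :param type: list(int)\n    '
--     items = iter(worder)
--     (a, b) = (None, next(items, None))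
--     result = [b]
--     while b is not None:
--         (a, b) = (b, next(items, None))
--         if b is not None and a + 1 == b:
--             result.append(b)
--         else:
--             if len(result) > 1:
--                 yield tuple(result)
--             result = [b]
-- ===== SOURCE B (Python) =====
-- def find_increasing_sequences(worder):
--     """Staged approach: first compute the list of break positions (indices where
--     the +1 chain is broken), then slice worder between consecutive breaks and
--     yield the slices longer than one element."""
--     n = len(worder)
--     breaks = [0] + [i for i in range(1, n) if worder[i] != worder[i - 1] + 1] + [n]
--     for s, e in zip(breaks, breaks[1:]):
--         if e - s > 1:
--             yield tuple(worder[s:e])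
-- ===== Notes on version B (the rewrite author's own statement) =====
-- stated objective: alternative
-- what changed: Replaces the iterator/None-sentinel single-pass accumulator loop with a staged computation: first build the list of break indices where the +1 chain stops, then slice worder between consecutive breaks and yield the slices longer than one.
import Mathlib
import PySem

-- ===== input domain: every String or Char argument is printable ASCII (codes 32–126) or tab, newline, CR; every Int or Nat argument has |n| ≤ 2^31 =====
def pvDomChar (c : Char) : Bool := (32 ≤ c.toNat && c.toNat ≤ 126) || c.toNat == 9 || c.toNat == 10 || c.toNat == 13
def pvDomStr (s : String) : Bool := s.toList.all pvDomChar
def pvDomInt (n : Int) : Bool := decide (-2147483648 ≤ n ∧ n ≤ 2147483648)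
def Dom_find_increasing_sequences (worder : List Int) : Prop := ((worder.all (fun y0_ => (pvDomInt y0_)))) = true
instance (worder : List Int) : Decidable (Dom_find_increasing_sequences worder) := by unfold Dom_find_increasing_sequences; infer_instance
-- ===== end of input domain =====

-- B replaces A's iterator/None-sentinel accumulator loop with a staged computation:
-- break indices of the +1 chain first, then slicing between consecutive breaks (no speed claim).


-- ===== PORT A =====
-- A's while loop: state b (current element), result (current run); on each step
-- pull the next element, extend the run on a+1==b, otherwise yield runs longer than 1.
def goA_find_increasing_sequences (b : Int) (result : List Int) (rest : List Int) : List (List Int) :=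
  match rest with
  | [] => if result.length > 1 then [result] else []
  | c :: rest' =>
    if b + 1 = c then goA_find_increasing_sequences c (result ++ [c]) rest'
    else (if result.length > 1 then [result] else []) ++ goA_find_increasing_sequences c [c] rest'

def find_increasing_sequences (worder : List Int) : List (List Int) :=
  match worder with
  | [] => []            -- first next() returns None: loop body never runs, nothing yielded
  | x :: xs => goA_find_increasing_sequences x [x] xs

-- ===== PORT B =====
-- Source B line by line: n = len(worder); breaks = [0] + [i for i in range(1,n) if worder[i] != worder[i-1]+1] + [n];
-- then for (s,e) in zip(breaks, breaks[1:]): if e-s > 1: yield tuple(worder[s:e]).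
-- worder[i] is ported as pyGetD (exact here: every i drawn from range(1, n) is in range).
def find_increasing_sequences_alt (worder : List Int) : List (List Int) :=
  let n : Int := worder.length
  let breaks : List Int :=
    0 :: (PySem.List.pyRange 1 n).filter
      (fun i => !(PySem.List.pyGetD worder i 0 == PySem.List.pyGetD worder (i - 1) 0 + 1)) ++ [n]
  (breaks.zip (PySem.List.slice breaks (some 1) none)).foldl
    (fun acc p => if p.2 - p.1 > 1 then acc ++ [PySem.List.slice worder (some p.1) (some p.2)] else acc) []

-- ===== PRECONDITION & SPEC =====
def Spec_find_increasing_sequences (worder : List Int) (out : List (List Int)) : Prop := out = find_increasing_sequences_alt worder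
instance (worder : List Int) (out : List (List Int)) : Decidable (Spec_find_increasing_sequences worder out) := by unfold Spec_find_increasing_sequences; infer_instance

-- ===== CLAIM (what is proved, stated in full; the proofs are below) =====
def Claim_equal_find_increasing_sequences : Prop := ∀ (worder : List Int), Dom_find_increasing_sequences worder → Spec_find_increasing_sequences worder (find_increasing_sequences worder)

-- ===== LEMMAS AND PROOFS =====

-- splitRun b xs = (r, rem): r is the maximal prefix of xs continuing the +1 run ending at b.
def splitRun (b : Int) : List Int → List Int × List Int
  | [] => ([], [])
  | c :: rest => if b + 1 = c then (c :: (splitRun c rest).1, (splitRun c rest).2) else ([], c :: rest)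

theorem splitRun_append (xs : List Int) : ∀ b : Int, (splitRun b xs).1 ++ (splitRun b xs).2 = xs := by
  induction xs with
  | nil => intro b; simp [splitRun]
  | cons c rest ih =>
    intro b
    by_cases h : b + 1 = c <;> simp [splitRun, h, ih c]

theorem splitRun_rem_length_le (xs : List Int) (b : Int) : (splitRun b xs).2.length ≤ xs.length := by
  have := congrArg List.length (splitRun_append xs b)
  simp at this; omega

-- canonical run decomposition: peel the first maximal run, keep it if longer than one.
def canon : List Int → List (List Int)
  | [] => []
  | x :: xs =>
    (if (splitRun x xs).1 ≠ [] then [x :: (splitRun x xs).1] else []) ++ canon (splitRun x xs).2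
termination_by l => l.length
decreasing_by
  simp
  exact splitRun_rem_length_le xs x

-- ---- A = canon ----

theorem goA_eq (rest : List Int) : ∀ (b : Int) (res : List Int),
    goA_find_increasing_sequences b res rest =
      (if (res ++ (splitRun b rest).1).length > 1 then [res ++ (splitRun b rest).1] else [])
        ++ canon (splitRun b rest).2 := by
  induction rest with
  | nil => intro b res; simp [goA_find_increasing_sequences, splitRun, canon.eq_1]
  | cons c rest' ih =>
    intro b res
    by_cases h : b + 1 = c
    · simp only [goA_find_increasing_sequences, splitRun, if_pos h, ih c (res ++ [c])]
      simp
    · simp only [goA_find_increasing_sequences, splitRun, if_neg h]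
      rw [ih c [c]]
      have hcanon : canon (c :: rest') =
          (if (splitRun c rest').1 ≠ [] then [c :: (splitRun c rest').1] else [])
            ++ canon (splitRun c rest').2 := by rw [canon.eq_2]
      rw [hcanon]
      rcases (splitRun c rest').1 with _ | ⟨y, ys⟩ <;> simp

theorem A_eq_canon (w : List Int) : find_increasing_sequences w = canon w := by
  cases w with
  | nil => simp [find_increasing_sequences, canon.eq_1]
  | cons x xs =>
    rw [find_increasing_sequences, goA_eq, canon.eq_2]
    congr 1
    rcases hr : (splitRun x xs).1 with _ | ⟨y, ys⟩ <;> simp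

-- ---- run facts ----

theorem splitRun_getElem (xs : List Int) : ∀ (b : Int) (k : Nat) (hk : k < (splitRun b xs).1.length),
    (splitRun b xs).1[k] = b + 1 + k := by
  induction xs with
  | nil => intro b k hk; simp [splitRun] at hk
  | cons c rest ih =>
    intro b k hk
    by_cases h : b + 1 = c
    · simp only [splitRun, if_pos h] at hk ⊢
      cases k with
      | zero => simpa using h.symm
      | succ k' =>
        simp only [List.getElem_cons_succ]
        rw [ih c k' (by simpa using hk)]
        push_cast; omega
    · simp [splitRun, if_neg h] at hk

theorem run_getElem (x : Int) (xs : List Int) (k : Nat) (hk : k < (splitRun x xs).1.length + 1) :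
    (x :: (splitRun x xs).1)[k]'(by simpa using hk) = x + k := by
  cases k with
  | zero => simp
  | succ k' =>
    simp only [List.getElem_cons_succ]
    rw [splitRun_getElem xs x k' (by omega)]
    push_cast; omega

theorem splitRun_head (xs : List Int) : ∀ (b : Int) (c : Int) (t : List Int),
    (splitRun b xs).2 = c :: t → b + (splitRun b xs).1.length + 1 ≠ c := by
  induction xs with
  | nil => intro b c t h; simp [splitRun] at h
  | cons c' rest ih =>
    intro b c t h
    by_cases hb : b + 1 = c'
    · simp only [splitRun, if_pos hb] at h ⊢
      have := ih c' c t h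
      simp only [List.length_cons]
      push_cast; omega
    · simp only [splitRun, if_neg hb] at h ⊢
      obtain ⟨h1, _⟩ := List.cons.injEq .. ▸ (h : c' :: rest = c :: t)
      subst h1; simpa using hb

-- ---- B side ----

-- the break-index comprehension of Source B, as a function of the list
def brksOf (w : List Int) : List Int :=
  (PySem.List.pyRange 1 (w.length : Int)).filter
    (fun i => !(PySem.List.pyGetD w i 0 == PySem.List.pyGetD w (i - 1) 0 + 1))

theorem find_alt_eq (w : List Int) :
    find_increasing_sequences_alt w =
      ((0 :: brksOf w ++ [(w.length : Int)]).zip (brksOf w ++ [(w.length : Int)])).foldl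
        (fun acc p => if p.2 - p.1 > 1 then acc ++ [PySem.List.slice w (some p.1) (some p.2)] else acc) [] := by
  rw [find_increasing_sequences_alt]
  rw [PySem.List.slice_from_one]
  rfl

theorem pyRange_one_shift (a b t : Int) :
    PySem.List.pyRange (a + t) (b + t) = (PySem.List.pyRange a b).map (· + t) := by
  rw [PySem.List.pyRange_one, PySem.List.pyRange_one, List.map_map]
  have : b + t - (a + t) = b - a := by ring
  rw [this]
  exact List.map_congr_left (fun k _ => by simp; ring)

theorem slice_shift (u v : List Int) (s e : Int) (hs : 0 ≤ s) (he : 0 ≤ e) :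
    PySem.List.slice (u ++ v) (some (s + u.length)) (some (e + u.length)) =
      PySem.List.slice v (some s) (some e) := by
  rw [PySem.List.slice_toNat _ (by omega) (by omega), PySem.List.slice_toNat _ hs he]
  have h1 : (s + (u.length : Int)).toNat = u.length + s.toNat := by omega
  rw [h1]
  have h2 : (e + (u.length : Int)).toNat - (u.length + s.toNat) = e.toNat - s.toNat := by omega
  rw [h2, List.drop_append, List.drop_eq_nil_of_le (by omega), List.nil_append,
    show u.length + s.toNat - u.length = s.toNat by omega]

-- run/boundary facts about x :: xs through splitRun
theorem splitRun_run_length_le (xs : List Int) (b : Int) : (splitRun b xs).1.length ≤ xs.length := by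
  have := congrArg List.length (splitRun_append xs b)
  simp at this; omega

theorem w_run_getElem (x : Int) (xs : List Int) (k : Nat) (hk : k < (splitRun x xs).1.length + 1)
    (hb : k < (x :: xs).length) : (x :: xs)[k] = x + k := by
  have hx : x :: xs = (x :: (splitRun x xs).1) ++ (splitRun x xs).2 := by
    simpa using congrArg (x :: ·) (splitRun_append xs x).symm
  rw [List.getElem_of_eq hx, List.getElem_append_left (by simpa using hk)]
  exact run_getElem x xs k hk

theorem w_rem_getElem (x : Int) (xs : List Int) (j : Nat) (hj : j < (splitRun x xs).2.length)
    (hb : (splitRun x xs).1.length + 1 + j < (x :: xs).length) :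
    (x :: xs)[(splitRun x xs).1.length + 1 + j] = (splitRun x xs).2[j] := by
  have hx : x :: xs = (x :: (splitRun x xs).1) ++ (splitRun x xs).2 := by
    simpa using congrArg (x :: ·) (splitRun_append xs x).symm
  rw [List.getElem_of_eq hx, List.getElem_append_right (by simp)]
  exact getElem_congr rfl (by simp) (by simp; omega)

-- the comprehension's condition is false inside the leading run
theorem pred_run_false (x : Int) (xs : List Int) (i : Int) (h1 : 1 ≤ i)
    (h2 : i < ((splitRun x xs).1.length : Int) + 1) :
    (!(PySem.List.pyGetD (x :: xs) i 0 == PySem.List.pyGetD (x :: xs) (i - 1) 0 + 1)) = false := by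
  have hle := splitRun_run_length_le xs x
  rw [PySem.List.pyGetD_eq_getElem _ 0 (by omega) (by simp; omega),
      PySem.List.pyGetD_eq_getElem _ 0 (by omega) (by simp; omega),
      w_run_getElem x xs i.toNat (by omega) (by simp; omega),
      w_run_getElem x xs (i - 1).toNat (by omega) (by simp; omega)]
  simp only [Bool.not_eq_false', beq_iff_eq]
  omega

-- it is true at the first position after the run (the break position)
theorem pred_break_true (x : Int) (xs : List Int) (c : Int) (t : List Int)
    (hrem : (splitRun x xs).2 = c :: t) :
    (!(PySem.List.pyGetD (x :: xs) (((splitRun x xs).1.length : Int) + 1) 0 ==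
       PySem.List.pyGetD (x :: xs) (((splitRun x xs).1.length : Int) + 1 - 1) 0 + 1)) = true := by
  have hle := splitRun_run_length_le xs x
  have hrl : 0 < (splitRun x xs).2.length := by rw [hrem]; simp
  have hxl : (splitRun x xs).1.length + (splitRun x xs).2.length = xs.length := by
    have := congrArg List.length (splitRun_append xs x); simpa using this
  rw [PySem.List.pyGetD_eq_getElem _ 0 (by omega) (by simp; omega),
      PySem.List.pyGetD_eq_getElem _ 0 (by omega) (by simp; omega)]
  have e1 : (((splitRun x xs).1.length : Int) + 1).toNat = (splitRun x xs).1.length + 1 + 0 := by omega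
  rw [getElem_congr rfl e1 (by simp; omega), w_rem_getElem x xs 0 (by omega) (by simp; omega),
      w_run_getElem x xs (((splitRun x xs).1.length : Int) + 1 - 1).toNat (by omega) (by simp; omega)]
  have hne := splitRun_head xs x c t hrem
  simp only [Bool.not_eq_true', beq_eq_false_iff_ne, ne_eq, hrem]
  intro hcontra
  simp at hcontra
  omega

-- beyond the break, the condition only looks at rem, shifted by the run length
theorem pred_shift (x : Int) (xs : List Int) (i : Int) (h1 : 1 ≤ i)
    (h2 : i < ((splitRun x xs).2.length : Int)) :
    (!(PySem.List.pyGetD (x :: xs) (i + (((splitRun x xs).1.length : Int) + 1)) 0 ==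
       PySem.List.pyGetD (x :: xs) (i + (((splitRun x xs).1.length : Int) + 1) - 1) 0 + 1)) =
    (!(PySem.List.pyGetD (splitRun x xs).2 i 0 == PySem.List.pyGetD (splitRun x xs).2 (i - 1) 0 + 1)) := by
  have hle := splitRun_run_length_le xs x
  have hxl : (splitRun x xs).1.length + (splitRun x xs).2.length = xs.length := by
    have := congrArg List.length (splitRun_append xs x); simpa using this
  rw [PySem.List.pyGetD_eq_getElem (x :: xs) 0 (by omega) (by simp; omega),
      PySem.List.pyGetD_eq_getElem (x :: xs) 0 (by omega) (by simp; omega),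
      PySem.List.pyGetD_eq_getElem (splitRun x xs).2 0 (by omega) (by omega),
      PySem.List.pyGetD_eq_getElem (splitRun x xs).2 0 (by omega) (by omega)]
  have e1 : (i + (((splitRun x xs).1.length : Int) + 1)).toNat =
      (splitRun x xs).1.length + 1 + i.toNat := by omega
  have e2 : (i + (((splitRun x xs).1.length : Int) + 1) - 1).toNat =
      (splitRun x xs).1.length + 1 + (i.toNat - 1) := by omega
  rw [getElem_congr rfl e1 (by simp; omega), getElem_congr rfl e2 (by simp; omega),
      w_rem_getElem x xs i.toNat (by omega) (by simp; omega),
      w_rem_getElem x xs (i.toNat - 1) (by omega) (by simp; omega)]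
  have e3 : (i - 1).toNat = i.toNat - 1 := by omega
  rw [getElem_congr rfl e3 (by omega)]

-- every break index produced by the comprehension is at least 1
theorem brksOf_ge_one (v : List Int) : ∀ y ∈ brksOf v, 1 ≤ y := by
  intro y hy
  have := List.mem_filter.mp hy
  exact (PySem.List.mem_pyRange_one.mp this.1).1

-- characterization of the break list of x :: xs through splitRun
theorem brks_cons (x : Int) (xs : List Int) :
    brksOf (x :: xs) =
      (if (splitRun x xs).2 = [] then []
       else (((splitRun x xs).1.length : Int) + 1) ::
            (brksOf (splitRun x xs).2).map (· + (((splitRun x xs).1.length : Int) + 1))) := by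
  have hle := splitRun_run_length_le xs x
  have hxl : (splitRun x xs).1.length + (splitRun x xs).2.length = xs.length := by
    have := congrArg List.length (splitRun_append xs x); simpa using this
  unfold brksOf
  rw [show ((x :: xs).length : Int) =
        (((splitRun x xs).1.length : Int) + 1) + ((splitRun x xs).2.length : Int) by simp; omega,
      PySem.List.pyRange_one_append 1 (((splitRun x xs).1.length : Int) + 1) _ (by omega) (by omega),
      List.filter_append]
  have hfirst : (PySem.List.pyRange 1 (((splitRun x xs).1.length : Int) + 1)).filter
      (fun i => !(PySem.List.pyGetD (x :: xs) i 0 == PySem.List.pyGetD (x :: xs) (i - 1) 0 + 1)) = [] := by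
    apply List.filter_eq_nil_iff.mpr
    intro i hi
    have hm := PySem.List.mem_pyRange_one.mp hi
    simp [pred_run_false x xs i hm.1 hm.2]
  rw [hfirst, List.nil_append]
  by_cases hrem0 : (splitRun x xs).2 = []
  · rw [if_pos hrem0]
    apply List.filter_eq_nil_iff.mpr
    intro i hi
    have hm := PySem.List.mem_pyRange_one.mp hi
    exfalso
    rw [hrem0] at hm
    simp at hm
    omega
  · obtain ⟨c, t, hrem⟩ := List.exists_cons_of_ne_nil hrem0
    have hrl : 0 < (splitRun x xs).2.length := by rw [hrem]; simp
    rw [if_neg hrem0]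
    rw [PySem.List.pyRange_one_cons (by omega)]
    rw [show (((splitRun x xs).1.length : Int) + 1) + ((splitRun x xs).2.length : Int) =
          ((splitRun x xs).2.length : Int) + (((splitRun x xs).1.length : Int) + 1) by ring,
        show (((splitRun x xs).1.length : Int) + 1) + 1 = 1 + (((splitRun x xs).1.length : Int) + 1) by ring,
        pyRange_one_shift 1 ((splitRun x xs).2.length : Int) (((splitRun x xs).1.length : Int) + 1)]
    simp only [List.filter_cons, pred_break_true x xs c t hrem, if_true]
    congr 1
    rw [List.filter_map]
    congr 1
    apply List.filter_congr
    intro i hi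
    have hm := PySem.List.mem_pyRange_one.mp hi
    simp only [Function.comp_apply]
    exact pred_shift x xs i hm.1 hm.2

theorem breaks_tail_nonneg (v : List Int) : ∀ y ∈ brksOf v ++ [(v.length : Int)], 0 ≤ y := by
  intro y hy
  rcases List.mem_append.mp hy with h | h
  · have := brksOf_ge_one v y h; omega
  · simp at h; omega

theorem zip_breaks_shift (B' : List Int) (m L : Int) :
    ((0 : Int) :: L :: (B'.map (· + L) ++ [m + L])).zip (L :: (B'.map (· + L) ++ [m + L])) =
      ((0 : Int), L) :: ((((0 : Int) :: B' ++ [m]).zip (B' ++ [m])).map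
        (Prod.map (· + L) (· + L))) := by
  rw [List.zip_cons_cons]
  have h1 : B'.map (· + L) ++ [m + L] = (B' ++ [m]).map (· + L) := by simp
  rw [h1, show L :: (B' ++ [m]).map (· + L) = (((0 : Int) :: B' ++ [m]).map (· + L)) by simp,
      List.zip_map]

theorem B_eq_canon (w : List Int) : find_increasing_sequences_alt w = canon w := by
  induction w using canon.induct with
  | case1 => rw [canon.eq_1]; rfl
  | case2 x xs ih =>
    rw [find_alt_eq, brks_cons, canon.eq_2]
    have hle := splitRun_run_length_le xs x
    have hxl : (splitRun x xs).1.length + (splitRun x xs).2.length = xs.length := by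
      have := congrArg List.length (splitRun_append xs x); simpa using this
    by_cases hrem0 : (splitRun x xs).2 = []
    · rw [if_pos hrem0, hrem0, canon.eq_1, List.append_nil]
      have hr : (splitRun x xs).1 = xs := by
        have := splitRun_append xs x; rw [hrem0] at this; simpa using this
      simp only [List.cons_append, List.nil_append, List.zip_cons_cons, List.zip_nil_right,
        List.foldl_cons, List.foldl_nil]
      by_cases hxs : xs = []
      · subst hxs
        rw [if_neg (by norm_num), if_neg (by simp [hr])]
      · have hpos : 0 < xs.length := List.length_pos_iff.mpr hxs
        rw [if_pos (by simp; omega), if_pos (by simp [hr, hxs])]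
        rw [PySem.List.slice_zero_start, PySem.List.slice_to _ (by positivity)]
        simp [hr]
    · obtain ⟨c, t, hrem⟩ := List.exists_cons_of_ne_nil hrem0
      have hrl : 0 < (splitRun x xs).2.length := by rw [hrem]; simp
      rw [if_neg hrem0]
      simp only [List.cons_append]
      rw [show ((x :: xs).length : Int) =
            ((splitRun x xs).2.length : Int) + (((splitRun x xs).1.length : Int) + 1) by
          simp; omega]
      rw [zip_breaks_shift (brksOf (splitRun x xs).2) ((splitRun x xs).2.length : Int)
            (((splitRun x xs).1.length : Int) + 1)]
      rw [PySem.List.foldl_append_ite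
            (fun p : Int × Int => p.2 - p.1 > 1)
            (fun p : Int × Int => PySem.List.slice (x :: xs) (some p.1) (some p.2))]
      rw [List.nil_append, List.filter_cons]
      -- the shifted pairs pass the length-1 test exactly as the unshifted ones do
      have hfiltF : List.filter
            (fun q => decide ((q : Int × Int).2 - q.1 > 1))
            ((List.zip (0 :: brksOf (splitRun x xs).2 ++ [((splitRun x xs).2.length : Int)])
                (brksOf (splitRun x xs).2 ++ [((splitRun x xs).2.length : Int)])).map
              (Prod.map (· + (((splitRun x xs).1.length : Int) + 1)) (· + (((splitRun x xs).1.length : Int) + 1)))) =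
          (List.filter (fun q => decide ((q : Int × Int).2 - q.1 > 1))
            (List.zip (0 :: brksOf (splitRun x xs).2 ++ [((splitRun x xs).2.length : Int)])
              (brksOf (splitRun x xs).2 ++ [((splitRun x xs).2.length : Int)]))).map
              (Prod.map (· + (((splitRun x xs).1.length : Int) + 1)) (· + (((splitRun x xs).1.length : Int) + 1))) := by
        rw [List.filter_map]
        congr 1
        apply List.filter_congr
        intro q _
        simp only [Function.comp_apply, Prod.map]
        exact decide_eq_decide.mpr (by omega)
      -- the shifted slice of x :: xs is the slice of rem
      have hsliceF : ∀ q ∈ List.filter (fun q => decide ((q : Int × Int).2 - q.1 > 1))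
            (List.zip (0 :: brksOf (splitRun x xs).2 ++ [((splitRun x xs).2.length : Int)])
              (brksOf (splitRun x xs).2 ++ [((splitRun x xs).2.length : Int)])),
          PySem.List.slice (x :: xs)
              (some (q.1 + (((splitRun x xs).1.length : Int) + 1)))
              (some (q.2 + (((splitRun x xs).1.length : Int) + 1))) =
            PySem.List.slice (splitRun x xs).2 (some q.1) (some q.2) := by
        intro q hq
        have hqz := List.of_mem_zip (List.mem_of_mem_filter hq)
        have hq1 : 0 ≤ q.1 := by
          rcases List.mem_cons.mp hqz.1 with h | h
          · omega
          · exact le_trans (by omega) (breaks_tail_nonneg _ _ h)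
        have hq2 : 0 ≤ q.2 := breaks_tail_nonneg _ _ hqz.2
        have hx : x :: xs = (x :: (splitRun x xs).1) ++ (splitRun x xs).2 := by
          simpa using congrArg (x :: ·) (splitRun_append xs x).symm
        rw [hx, show (((splitRun x xs).1.length : Int) + 1) = ((x :: (splitRun x xs).1).length : Int) by simp,
            slice_shift _ _ q.1 q.2 hq1 hq2]
      -- the tail of the fold is exactly B on rem, which is canon rem by the IH
      have htail : (List.filter (fun q => decide ((q : Int × Int).2 - q.1 > 1))
            (List.zip (0 :: brksOf (splitRun x xs).2 ++ [((splitRun x xs).2.length : Int)])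
              (brksOf (splitRun x xs).2 ++ [((splitRun x xs).2.length : Int)]))).map
              ((fun p => PySem.List.slice (x :: xs) (some (p : Int × Int).1) (some p.2)) ∘
                Prod.map (· + (((splitRun x xs).1.length : Int) + 1)) (· + (((splitRun x xs).1.length : Int) + 1))) =
          canon (splitRun x xs).2 := by
        rw [← ih, find_alt_eq,
            PySem.List.foldl_append_ite
              (fun p : Int × Int => p.2 - p.1 > 1)
              (fun p : Int × Int => PySem.List.slice (splitRun x xs).2 (some p.1) (some p.2)),
            List.nil_append]
        apply List.map_congr_left
        intro q hq
        simp only [Function.comp_apply, Prod.map]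
        exact hsliceF q hq
      by_cases hr0 : (splitRun x xs).1 = []
      · rw [if_neg (by norm_num [hr0]), hfiltF, List.map_map, htail, if_neg (by simp [hr0]),
            List.nil_append]
      · have hpos : 0 < (splitRun x xs).1.length := List.length_pos_iff.mpr hr0
        rw [if_pos (by simp; omega), List.map_cons, hfiltF, List.map_map, htail,
            if_pos (by simp [hr0])]
        rw [PySem.List.slice_zero_start, PySem.List.slice_to _ (by positivity)]
        have hxd : x :: xs = (x :: (splitRun x xs).1) ++ (splitRun x xs).2 := by
          simpa using congrArg (x :: ·) (splitRun_append xs x).symm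
        rw [show ((((splitRun x xs).1.length : Int) + 1)).toNat = (x :: (splitRun x xs).1).length
              by simp, hxd, List.take_left' rfl]
        simp

-- ===== VERDICT (by name: the statement is the Claim_ definition above) =====
theorem find_increasing_sequences_spec : Claim_equal_find_increasing_sequences := by
  intro w _
  unfold Spec_find_increasing_sequences
  rw [A_eq_canon, B_eq_canon]
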